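-- pv_equiv track=rewrite | github.com/remiroyc/indexer | indexer/decoder.py | decode_felt_to_domain_string
-- ===== SOURCE A (Python) =====
-- def decode_felt_to_domain_string(felt):
--     basicAlphabet = "abcdefghijklmnopqrstuvwxyz0123456789-"
--     bigAlphabet = "这来"
--     decoded = ""
--     big_size = len(basicAlphabet) + 1
--     while felt != 0:
--         code = felt % big_size
--         felt = felt // big_size
--         if code == len(basicAlphabet):
--             code2 = felt % big_size
--             decoded += bigAlphabet[code2]
--             felt = felt // big_size
--         else:
--             decoded += basicAlphabet[code]
--     return decoded
-- ===== SOURCE B (Python) =====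
-- def decode_felt_to_domain_string(felt):
--     basicAlphabet = "abcdefghijklmnopqrstuvwxyz0123456789-"
--     bigAlphabet = "这来"
--     # pass 1: base-38 digits, least-significant first
--     digits = []
--     while felt > 0:
--         digits.append(felt % 38)
--         felt //= 38
--     # pass 2: consume the digits; 37 is an escape taking the next digit (0 if absent)
--     chars = []
--     it = iter(digits)
--     for d in it:
--         if d == 37:
--             chars.append(bigAlphabet[next(it, 0)])
--         else:
--             chars.append(basicAlphabet[d])
--     return "".join(chars)
-- ===== Notes on version B (the rewrite author's own statement) =====
-- stated objective: alternative
-- what changed: B separates decoding into two passes: first extract the full list of base-38 digits by repeated divmod, then a second index-driven scan over that list turns digits into characters (37 escapes the next digit, defaulting to 0 past the end), instead of A's single loop that interleaves division with character emission.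
import Mathlib
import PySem

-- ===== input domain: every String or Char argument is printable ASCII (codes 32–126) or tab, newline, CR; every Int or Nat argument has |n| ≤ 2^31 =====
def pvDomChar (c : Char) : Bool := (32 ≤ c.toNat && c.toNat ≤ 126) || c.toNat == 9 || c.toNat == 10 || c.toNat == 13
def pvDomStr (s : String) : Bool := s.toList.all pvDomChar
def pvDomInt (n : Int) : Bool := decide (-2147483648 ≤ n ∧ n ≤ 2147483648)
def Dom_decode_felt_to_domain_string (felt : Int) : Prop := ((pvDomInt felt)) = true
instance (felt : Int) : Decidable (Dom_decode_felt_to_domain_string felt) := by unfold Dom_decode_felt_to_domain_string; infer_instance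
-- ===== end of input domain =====

-- B decodes in two passes (digit extraction, then a scan of the digit list) instead of
-- A's single loop interleaving division and character emission; same cost, alternative structure.

-- ===== PORT A =====
def pvBasicAlphabet : String := "abcdefghijklmnopqrstuvwxyz0123456789-"
def pvBigAlphabet : String := "这来"

-- A's while loop; 'decoded' is the accumulated characters (joined into a String at the end,
-- since Lean's own String append is kernel-opaque).  The Nat fuel (felt.toNat suffices, each
-- iteration divides felt by 38) and the 'felt ≤ 0' test only make Python's 'while felt != 0'
-- total: for felt < 0 the Python loop never returns (outside Pre_), and the '.getD ☒' default
-- stands for the IndexError of bigAlphabet[code2], also outside Pre_.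
def pvLoopA : Nat → Int → List Char → List Char
  | 0, _, decoded => decoded
  | fuel + 1, felt, decoded =>
    if felt ≤ 0 then decoded
    else
      let code := PySem.Int.mod felt 38
      let felt1 := PySem.Int.floordiv felt 38
      if code = 37 then
        let code2 := PySem.Int.mod felt1 38
        pvLoopA fuel (PySem.Int.floordiv felt1 38)
          (decoded ++ [(PySem.Str.pyGet? pvBigAlphabet code2).getD '☒'])
      else
        pvLoopA fuel felt1 (decoded ++ [(PySem.Str.pyGet? pvBasicAlphabet code).getD '☒'])

def decode_felt_to_domain_string (felt : Int) : String :=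
  String.ofList (pvLoopA felt.toNat felt [])

-- ===== PORT B =====
-- pass 1: base-38 digits, least-significant first ('while felt > 0'; fuel as above)
def pvDigits : Nat → Int → List Int
  | 0, _ => []
  | fuel + 1, felt =>
    if felt ≤ 0 then []
    else PySem.Int.mod felt 38 :: pvDigits fuel (PySem.Int.floordiv felt 38)

-- pass 2: B's 'for d in it' scan; 37 escapes the next digit taken from the iterator (0 if exhausted).
-- '.getD ☒' again only covers the IndexError cases excluded by Pre_.
def pvPass : List Int → List Char
  | [] => []
  | d :: rest =>
    if d = 37 then
      match rest with
      | [] => [(PySem.Str.pyGet? pvBigAlphabet 0).getD '☒']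
      | nxt :: rest' => (PySem.Str.pyGet? pvBigAlphabet nxt).getD '☒' :: pvPass rest'
    else (PySem.Str.pyGet? pvBasicAlphabet d).getD '☒' :: pvPass rest

def decode_felt_to_domain_string_alt (felt : Int) : String :=
  String.ofList (pvPass (pvDigits felt.toNat felt))

-- ===== PRECONDITION & SPEC =====
-- Pre_ excludes exactly the inputs where the Python A raises: negative felt (the loop reaches -1
-- and bigAlphabet[37] raises IndexError) and non-negative felt in whose base-38 expansion a digit
-- 37 is followed by a digit ≥ 2 (bigAlphabet[code2] raises IndexError).  The bound k < 7 is
-- enough for every felt in Dom (38^7 > 2^31; higher digits are 0).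
def Pre_decode_felt_to_domain_string (felt : Int) : Prop :=
  0 ≤ felt ∧ ∀ k : Nat, k < 7 →
    (felt / 38 ^ k) % 38 = 37 → (felt / 38 ^ (k + 1)) % 38 ≤ 1
instance (felt : Int) : Decidable (Pre_decode_felt_to_domain_string felt) := by
  unfold Pre_decode_felt_to_domain_string; infer_instance

def pvWitness_decode_felt_to_domain_string : Int := 1000

def Spec_decode_felt_to_domain_string (felt : Int) (out : String) : Prop := out = decode_felt_to_domain_string_alt felt
instance (felt : Int) (out : String) : Decidable (Spec_decode_felt_to_domain_string felt out) := by unfold Spec_decode_felt_to_domain_string; infer_instance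

-- ===== CLAIM (what is proved, stated in full; the proofs are below) =====
def Claim_equal_decode_felt_to_domain_string : Prop := ∀ (felt : Int), Dom_decode_felt_to_domain_string felt → Pre_decode_felt_to_domain_string felt → Spec_decode_felt_to_domain_string felt (decode_felt_to_domain_string felt)

-- ===== LEMMAS AND PROOFS =====

theorem pvDigits_nonpos (f : Nat) {felt : Int} (h : felt ≤ 0) : pvDigits f felt = [] := by
  cases f with
  | zero => rfl
  | succ g => simp [pvDigits, h]

-- any sufficient fuel computes the same digit list
theorem pvDigits_congr (f1 f2 : Nat) (felt : Int) (h1 : felt.toNat ≤ f1)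
    (h2 : felt.toNat ≤ f2) : pvDigits f1 felt = pvDigits f2 felt := by
  induction f1 generalizing f2 felt with
  | zero =>
    rw [pvDigits_nonpos f2 (by omega : felt ≤ 0)]; rfl
  | succ g ih =>
    by_cases hle : felt ≤ 0
    · rw [pvDigits_nonpos _ hle, pvDigits_nonpos _ hle]
    · have hpos : (0:Int) < felt := by omega
      have hfd : PySem.Int.floordiv felt 38 = felt / 38 :=
        PySem.Int.floordiv_eq_ediv_of_pos (by omega)
      cases f2 with
      | zero => omega
      | succ g2 =>
        simp only [pvDigits, if_neg hle]
        exact congrArg _ (ih g2 _ (by rw [hfd]; omega) (by rw [hfd]; omega))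

-- unfolding with the SAME fuel on both sides, for positive felt with enough fuel
theorem pvDigits_cons (f : Nat) {felt : Int} (hpos : 0 < felt) (hf : felt.toNat ≤ f) :
    pvDigits f felt = PySem.Int.mod felt 38 :: pvDigits f (PySem.Int.floordiv felt 38) := by
  have hfd : PySem.Int.floordiv felt 38 = felt / 38 :=
    PySem.Int.floordiv_eq_ediv_of_pos (by omega)
  cases f with
  | zero => omega
  | succ g =>
    simp only [pvDigits, if_neg (by omega : ¬ felt ≤ 0)]
    exact congrArg _ (pvDigits_congr g (g + 1) _ (by rw [hfd]; omega) (by rw [hfd]; omega))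

-- head digit with default 0 is exactly felt % 38 for every 0 ≤ felt
theorem pvDigits_headD (f : Nat) {felt : Int} (h : 0 ≤ felt) (hf : felt.toNat ≤ f) :
    (pvDigits f felt).getD 0 0 = PySem.Int.mod felt 38 := by
  rcases lt_or_eq_of_le h with hpos | hzero
  · rw [pvDigits_cons f hpos hf]; rfl
  · rw [pvDigits_nonpos f (le_of_eq hzero.symm), ← hzero]; decide

theorem pvDigits_tail (f : Nat) {felt : Int} (h : 0 ≤ felt) (hf : felt.toNat ≤ f) :
    (pvDigits f felt).drop 1 = pvDigits f (PySem.Int.floordiv felt 38) := by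
  rcases lt_or_eq_of_le h with hpos | hzero
  · rw [pvDigits_cons f hpos hf]; rfl
  · rw [pvDigits_nonpos f (le_of_eq hzero.symm),
        pvDigits_nonpos f (show PySem.Int.floordiv felt 38 ≤ 0 by rw [← hzero]; decide)]
    rfl

-- the 37-escape step of pvPass, uniformly over the (possibly empty) rest
theorem pvPass_cons37 (rest : List Int) :
    pvPass (37 :: rest) =
      (PySem.Str.pyGet? pvBigAlphabet (rest.getD 0 0)).getD '☒' :: pvPass (rest.drop 1) := by
  cases rest <;> simp [pvPass]

theorem pvPass_cons (d : Int) (rest : List Int) (hd : ¬ d = 37) :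
    pvPass (d :: rest) = (PySem.Str.pyGet? pvBasicAlphabet d).getD '☒' :: pvPass rest := by
  cases rest with
  | nil => simp only [pvPass, if_neg hd]
  | cons x r => simp only [pvPass, if_neg hd]

theorem pvLoop_eq_pass (fuel : Nat) (felt : Int) (acc : List Char) (hn : felt.toNat ≤ fuel) :
    pvLoopA fuel felt acc = acc ++ pvPass (pvDigits fuel felt) := by
  induction fuel generalizing felt acc with
  | zero =>
    simp [pvLoopA, pvDigits, pvPass]
  | succ m ih =>
    by_cases hle : felt ≤ 0
    · rw [pvDigits_nonpos _ hle]
      simp [pvLoopA, hle, pvPass]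
    · have hpos : (0:Int) < felt := by omega
      have hfd : PySem.Int.floordiv felt 38 = felt / 38 :=
        PySem.Int.floordiv_eq_ediv_of_pos (by omega)
      have hfd2 : PySem.Int.floordiv (felt / 38) 38 = felt / 38 / 38 :=
        PySem.Int.floordiv_eq_ediv_of_pos (by omega)
      have h1ge : (0:Int) ≤ felt / 38 := by omega
      have h1le : (felt / 38).toNat ≤ m := by omega
      rw [show pvDigits (m + 1) felt
            = PySem.Int.mod felt 38 :: pvDigits m (PySem.Int.floordiv felt 38) from by
          simp only [pvDigits, if_neg hle]]
      rw [show pvLoopA (m + 1) felt acc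
            = if PySem.Int.mod felt 38 = 37 then
                pvLoopA m (PySem.Int.floordiv (PySem.Int.floordiv felt 38) 38)
                  (acc ++ [(PySem.Str.pyGet? pvBigAlphabet
                    (PySem.Int.mod (PySem.Int.floordiv felt 38) 38)).getD '☒'])
              else
                pvLoopA m (PySem.Int.floordiv felt 38)
                  (acc ++ [(PySem.Str.pyGet? pvBasicAlphabet (PySem.Int.mod felt 38)).getD '☒'])
          from by simp only [pvLoopA, if_neg hle]]
      rw [hfd, hfd2]
      split
      · -- code = 37: big-alphabet branch
        rename_i h37
        rw [h37, pvPass_cons37,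
            pvDigits_headD m h1ge h1le,
            pvDigits_tail m h1ge h1le,
            hfd2,
            ih (felt / 38 / 38) _ (by omega)]
        simp
      · -- ordinary digit
        rw [pvPass_cons _ _ (by assumption), ih (felt / 38) _ (by omega)]
        simp

-- ===== VERDICT (by name: the statement is the Claim_ definition above) =====
theorem decode_felt_to_domain_string_spec : Claim_equal_decode_felt_to_domain_string := by
  intro felt _ _
  unfold Spec_decode_felt_to_domain_string decode_felt_to_domain_string decode_felt_to_domain_string_alt
  rw [pvLoop_eq_pass felt.toNat felt [] le_rfl]
  rfl
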